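-- pv_equiv track=rewrite | github.com/Persource2007/FES | public/separate_borders.py | merge_consecutive_segments
-- ===== SOURCE A (Python) =====
-- def merge_consecutive_segments(segments):
--     """Merge consecutive segments into LineStrings."""
--     if not segments:
--         return []
--
--     lines = []
--     current_line = [segments[0][0], segments[0][1]]
--
--     for i in range(1, len(segments)):
--         seg = segments[i]
--         if current_line[-1] == seg[0]:
--             current_line.append(seg[1])
--         else:
--             if len(current_line) >= 2:
--                 lines.append(current_line)
--             current_line = [seg[0], seg[1]]
--
--     if len(current_line) >= 2:
--         lines.append(current_line)
--
--     return lines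
-- ===== SOURCE B (Python) =====
-- def merge_consecutive_segments(segments):
--     """Merge consecutive segments into LineStrings."""
--     # Pass 1: split segments into runs of consecutive segments.
--     runs = []
--     for seg in segments:
--         if runs and runs[-1][-1][1] == seg[0]:
--             runs[-1].append(seg)
--         else:
--             runs.append([seg])
--     # Pass 2: turn each run into a chain of points.
--     return [[run[0][0]] + [s[1] for s in run] for run in runs]
-- ===== Notes on version B (the rewrite author's own statement) =====
-- stated objective: alternative
-- what changed: Replaced the single stateful loop that grows the current chain point-by-point with a two-pass decomposition: first group the segments into runs of consecutive segments, then map each run to its point chain.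
import Mathlib
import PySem

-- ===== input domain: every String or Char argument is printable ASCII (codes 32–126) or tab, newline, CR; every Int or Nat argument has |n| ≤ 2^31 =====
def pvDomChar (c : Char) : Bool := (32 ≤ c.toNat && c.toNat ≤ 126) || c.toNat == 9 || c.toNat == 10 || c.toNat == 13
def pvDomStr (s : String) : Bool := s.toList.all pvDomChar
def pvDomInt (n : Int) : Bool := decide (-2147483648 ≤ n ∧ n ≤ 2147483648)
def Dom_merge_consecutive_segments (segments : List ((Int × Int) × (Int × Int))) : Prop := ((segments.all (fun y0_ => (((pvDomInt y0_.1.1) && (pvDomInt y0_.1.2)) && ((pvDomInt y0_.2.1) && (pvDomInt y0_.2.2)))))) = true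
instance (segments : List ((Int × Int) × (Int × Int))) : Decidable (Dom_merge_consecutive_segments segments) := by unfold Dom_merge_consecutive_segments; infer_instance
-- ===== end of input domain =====

-- B replaces A's single stateful chain-growing loop with a two-pass decomposition
-- (group segments into runs, then map each run to its point chain); objective: alternative.


-- ===== PORT A =====
-- A's loop over segments[1:], carrying (lines, current_line); current_line is always
-- nonempty, so current_line[-1] is its getLast?.
def mcsLoopA : List ((Int × Int) × (Int × Int)) → List (List (Int × Int)) → List (Int × Int) → List (List (Int × Int))
  | [], lines, cur => if cur.length ≥ 2 then lines ++ [cur] else lines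
  | s :: rest, lines, cur =>
      if cur.getLast? = some s.1 then
        mcsLoopA rest lines (cur ++ [s.2])
      else
        mcsLoopA rest (if cur.length ≥ 2 then lines ++ [cur] else lines) [s.1, s.2]

def merge_consecutive_segments (segments : List ((Int × Int) × (Int × Int))) : List (List (Int × Int)) :=
  match segments with
  | [] => []
  | s :: rest => mcsLoopA rest [] [s.1, s.2]

-- ===== PORT B =====
-- Pass 1: group segments into runs (each run kept in reverse order while building,
-- mirroring Source B's append to runs[-1]; here the accumulator is the reversed current run).
def mcsRuns : ((Int × Int) × (Int × Int)) → List ((Int × Int) × (Int × Int)) → List ((Int × Int) × (Int × Int)) → List (List ((Int × Int) × (Int × Int)))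
  | _, acc, [] => [acc.reverse]
  | prev, acc, s :: rest =>
      if prev.2 = s.1 then mcsRuns s (s :: acc) rest
      else acc.reverse :: mcsRuns s [s] rest

-- Pass 2: [run[0][0]] + [s[1] for s in run]
def mcsChain (run : List ((Int × Int) × (Int × Int))) : List (Int × Int) :=
  match run with
  | [] => []
  | s :: _ => s.1 :: run.map (fun t => t.2)

def merge_consecutive_segments_alt (segments : List ((Int × Int) × (Int × Int))) : List (List (Int × Int)) :=
  match segments with
  | [] => []
  | s :: rest => (mcsRuns s [s] rest).map mcsChain

-- ===== PRECONDITION & SPEC =====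
def Spec_merge_consecutive_segments (segments : List ((Int × Int) × (Int × Int))) (out : List (List (Int × Int))) : Prop := out = merge_consecutive_segments_alt segments
instance (segments : List ((Int × Int) × (Int × Int))) (out : List (List (Int × Int))) : Decidable (Spec_merge_consecutive_segments segments out) := by unfold Spec_merge_consecutive_segments; infer_instance

-- ===== CLAIM (what is proved, stated in full; the proofs are below) =====
def Claim_equal_merge_consecutive_segments : Prop := ∀ (segments : List ((Int × Int) × (Int × Int))), Dom_merge_consecutive_segments segments → Spec_merge_consecutive_segments segments (merge_consecutive_segments segments)

-- ===== LEMMAS AND PROOFS =====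

lemma mcsChain_concat (run : List ((Int × Int) × (Int × Int))) (s : ((Int × Int) × (Int × Int)))
    (h : run ≠ []) : mcsChain (run ++ [s]) = mcsChain run ++ [s.2] := by
  cases run with
  | nil => exact absurd rfl h
  | cons a l => simp [mcsChain]

lemma mcsChain_getLast (prev : ((Int × Int) × (Int × Int))) (acc : List ((Int × Int) × (Int × Int))) :
    (mcsChain ((prev :: acc).reverse)).getLast? = some prev.2 := by
  induction acc with
  | nil => simp [mcsChain]
  | cons b l ih =>
      have hne : (b :: l).reverse ≠ [] := by simp
      have : (prev :: b :: l).reverse = (b :: l).reverse ++ [prev] := by simp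
      rw [this, mcsChain_concat _ _ hne, List.getLast?_append]
      simp

lemma mcsChain_len (prev : ((Int × Int) × (Int × Int))) (acc : List ((Int × Int) × (Int × Int))) :
    (mcsChain ((prev :: acc).reverse)).length = acc.length + 2 := by
  cases h : (prev :: acc).reverse with
  | nil => simp at h
  | cons a l =>
      have : (prev :: acc).reverse.length = acc.length + 1 := by simp
      rw [h] at this
      simp [mcsChain]
      simpa using this

lemma mcsLoop_key (rest : List ((Int × Int) × (Int × Int))) :
    ∀ (prev : ((Int × Int) × (Int × Int))) (acc : List ((Int × Int) × (Int × Int)))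
      (lines : List (List (Int × Int))),
      mcsLoopA rest lines (mcsChain ((prev :: acc).reverse))
        = lines ++ (mcsRuns prev (prev :: acc) rest).map mcsChain := by
  induction rest with
  | nil =>
      intro prev acc lines
      have hlen : (mcsChain ((prev :: acc).reverse)).length ≥ 2 := by
        rw [mcsChain_len]; omega
      simp only [mcsLoopA, mcsRuns, List.map]
      rw [if_pos hlen]
  | cons s rest ih =>
      intro prev acc lines
      by_cases h : prev.2 = s.1
      · have hg : (mcsChain ((prev :: acc).reverse)).getLast? = some s.1 := by
          rw [mcsChain_getLast, h]
        have hcat : mcsChain ((prev :: acc).reverse) ++ [s.2]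
            = mcsChain ((s :: prev :: acc).reverse) := by
          have : (s :: prev :: acc).reverse = (prev :: acc).reverse ++ [s] := by simp
          rw [this, mcsChain_concat _ _ (by simp)]
        simp only [mcsLoopA, hg, hcat, mcsRuns, if_pos h]
        exact ih s (prev :: acc) lines
      · have hg : ¬ (mcsChain ((prev :: acc).reverse)).getLast? = some s.1 := by
          rw [mcsChain_getLast]; simpa using h
        have hlen : (mcsChain ((prev :: acc).reverse)).length ≥ 2 := by
          rw [mcsChain_len]; omega
        have h2 : ([s.1, s.2] : List (Int × Int)) = mcsChain ((s :: ([] : List _)).reverse) := by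
          simp [mcsChain]
        simp only [mcsLoopA, hg, if_pos hlen, mcsRuns, if_neg h]
        rw [h2, ih s [] (lines ++ [mcsChain ((prev :: acc).reverse)])]
        simp

-- ===== VERDICT (by name: the statement is the Claim_ definition above) =====
theorem merge_consecutive_segments_spec : Claim_equal_merge_consecutive_segments := by
  intro segments _
  unfold Spec_merge_consecutive_segments
  cases segments with
  | nil => rfl
  | cons s rest =>
      have h2 : ([s.1, s.2] : List (Int × Int)) = mcsChain ((s :: ([] : List _)).reverse) := by
        simp [mcsChain]
      show mcsLoopA rest [] [s.1, s.2] = _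
      rw [h2, mcsLoop_key rest s [] []]
      rfl
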